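-- pv_equiv track=rewrite | github.com/bagherilab/arcade-collection | src/arcade_collection/input/group_template_conditions.py | find_seed_ranges
-- ===== SOURCE A (Python) =====
-- from itertools import groupby
--
-- def find_seed_ranges(seeds: list[int], max_seeds: int) -> list[tuple[int, int]]:
--     """
--     Find continuous seed ranges, with range no larger than specified max seeds.
--
--     Parameters
--     ----------
--     seeds
--         List of seeds.
--     max_seeds
--         Maximum number of seeds in a single range.
--
--     Returns
--     -------
--     :
--         List of seeds grouped into ranges.
--     """
--
--     seeds.sort()
--     ranges = []
--
--     for _, group in groupby(enumerate(seeds), lambda x: x[0] - x[1]):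
--         group_list = list(group)
--         subset = True
--         range_start = group_list[0][1]
--         range_end = group_list[-1][1]
--
--         while subset:
--             ranges.append((range_start, min(range_end, range_start + max_seeds - 1)))
--             range_start = range_start + max_seeds
--             if range_start > range_end:
--                 subset = False
--
--     return ranges
-- ===== SOURCE B (Python) =====
-- def find_seed_ranges(seeds: list[int], max_seeds: int) -> list[tuple[int, int]]:
--     """Single counting pass over the sorted seeds; no itertools, no per-run while loop."""
--     seeds.sort()
--     if not seeds:
--         return []
--     ranges = []
--     start = prev = seeds[0]
--     count = 1
--     for s in seeds[1:]:
--         if s != prev + 1 or count == max_seeds: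
--             ranges.append((start, prev))
--             start = s
--             count = 1
--         else:
--             count += 1
--         prev = s
--     ranges.append((start, prev))
--     return ranges
-- ===== Notes on version B (the rewrite author's own statement) =====
-- stated objective: simpler
-- what changed: Replaced the itertools.groupby run-detection plus a per-run while-loop chunker by a single linear pass over the sorted seeds that maintains chunk start, previous seed and a count, flushing a chunk when the run breaks or the chunk reaches max_seeds.
import Mathlib
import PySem

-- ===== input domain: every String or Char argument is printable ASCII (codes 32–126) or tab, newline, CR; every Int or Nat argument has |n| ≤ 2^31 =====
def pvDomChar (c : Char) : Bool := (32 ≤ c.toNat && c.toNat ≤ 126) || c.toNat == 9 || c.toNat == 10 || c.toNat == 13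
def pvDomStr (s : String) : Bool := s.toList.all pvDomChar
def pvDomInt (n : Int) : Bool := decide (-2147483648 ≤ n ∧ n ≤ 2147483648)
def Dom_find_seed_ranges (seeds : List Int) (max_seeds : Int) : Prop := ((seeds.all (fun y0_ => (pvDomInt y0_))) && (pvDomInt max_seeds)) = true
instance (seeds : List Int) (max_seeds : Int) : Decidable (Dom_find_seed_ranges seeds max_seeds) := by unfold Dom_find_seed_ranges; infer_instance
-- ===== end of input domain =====

-- B replaces A's groupby-plus-while chunking by one counting pass over the sorted seeds (simpler,
-- same cost); both versions sort the argument list in place in Python — the theorems are about the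
-- return value.

-- ===== PORT A =====
-- the Python while-loop over range_start; fuel (range_end-range_start).toNat+1 is enough iterations
-- whenever max_seeds ≥ 1 (Python diverges when max_seeds ≤ 0 and a group is nonempty)
def pvChunkLoop (ranges : List (Int × Int)) (range_start range_end max_seeds : Int) : Nat → List (Int × Int)
  | 0 => ranges
  | fuel+1 =>
    let ranges' := ranges ++ [(range_start, min range_end (range_start + max_seeds - 1))]
    let rs := range_start + max_seeds
    if rs > range_end then ranges' else pvChunkLoop ranges' rs range_end max_seeds fuel

def pvKey (p : Int × Int) : Int := p.1 - p.2

-- itertools.groupby: maximal blocks of adjacent pairs with equal key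
def pvGroups : List (Int × Int) → List (List (Int × Int))
  | [] => []
  | p :: rest =>
    match pvGroups rest with
    | [] => [[p]]
    | [] :: gs => [p] :: [] :: gs   -- unreachable: groups are never empty
    | (q :: g) :: gs => if pvKey p = pvKey q then (p :: q :: g) :: gs else [p] :: (q :: g) :: gs

def pvStep (max_seeds : Int) (ranges : List (Int × Int)) (g : List (Int × Int)) : List (Int × Int) :=
  match g with
  | [] => ranges                       -- unreachable: groups are never empty
  | p :: _ =>
    let range_start := p.2
    let range_end := (g.getLastD p).2
    pvChunkLoop ranges range_start range_end max_seeds ((range_end - range_start).toNat + 1)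

def find_seed_ranges (seeds : List Int) (max_seeds : Int) : List (Int × Int) :=
  let s := PySem.List.sorted seeds (fun x => x) false
  (pvGroups (PySem.List.enumerate s 0)).foldl (pvStep max_seeds) []

-- ===== PORT B =====
def pvBStep (max_seeds : Int) (st : List (Int × Int) × Int × Int × Int) (s : Int) :
    List (Int × Int) × Int × Int × Int :=
  let (ranges, start, prev, count) := st
  if s ≠ prev + 1 ∨ count = max_seeds then (ranges ++ [(start, prev)], s, s, 1)
  else (ranges, start, s, count + 1)

def find_seed_ranges_alt (seeds : List Int) (max_seeds : Int) : List (Int × Int) :=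
  match PySem.List.sorted seeds (fun x => x) false with
  | [] => []
  | a :: rest =>
    let st := rest.foldl (pvBStep max_seeds) ([], a, a, 1)
    st.1 ++ [(st.2.1, st.2.2.1)]

-- ===== PRECONDITION & SPEC =====
-- Pre_ excludes nonempty seeds with max_seeds ≤ 0, on which Python A never returns
-- (the while loop's range_start += max_seeds never passes range_end: infinite loop).
def Pre_find_seed_ranges (seeds : List Int) (max_seeds : Int) : Prop :=
  seeds = [] ∨ 1 ≤ max_seeds
instance (seeds : List Int) (max_seeds : Int) : Decidable (Pre_find_seed_ranges seeds max_seeds) := by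
  unfold Pre_find_seed_ranges; infer_instance

def pvWitness_find_seed_ranges : List Int × Int := ([3, 1, 2, 7, 8], 2)

def Spec_find_seed_ranges (seeds : List Int) (max_seeds : Int) (out : List (Int × Int)) : Prop := out = find_seed_ranges_alt seeds max_seeds
instance (seeds : List Int) (max_seeds : Int) (out : List (Int × Int)) : Decidable (Spec_find_seed_ranges seeds max_seeds out) := by unfold Spec_find_seed_ranges; infer_instance

-- ===== CLAIM (what is proved, stated in full; the proofs are below) =====
def Claim_equal_find_seed_ranges : Prop := ∀ (seeds : List Int) (max_seeds : Int), Dom_find_seed_ranges seeds max_seeds → Pre_find_seed_ranges seeds max_seeds → Spec_find_seed_ranges seeds max_seeds (find_seed_ranges seeds max_seeds)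

-- ===== LEMMAS AND PROOFS =====

-- B's loop body, accumulator-free
def pvBL (m : Int) : List Int → Int → Int → Int → List (Int × Int)
  | [], start, prev, _ => [(start, prev)]
  | s :: rest, start, prev, count =>
    if s ≠ prev + 1 ∨ count = m then (start, prev) :: pvBL m rest s s 1
    else pvBL m rest start s (count + 1)

-- the consecutive run prev+1, …, prev+k
def pvConsec (a : Int) : Nat → List Int
  | 0 => []
  | k+1 => (a + 1) :: pvConsec (a + 1) k

-- runs of consecutive integers (pvGroups with the indices dropped)
def pvRuns : List Int → List (List Int)
  | [] => []
  | a :: rest =>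
    match pvRuns rest with
    | [] => [[a]]
    | [] :: gs => [a] :: [] :: gs
    | (b :: g) :: gs => if b = a + 1 then (a :: b :: g) :: gs else [a] :: (b :: g) :: gs

-- chunking of a pure run, in B's counting style
def pvCP (m : Int) (start prev count : Int) : Nat → List (Int × Int)
  | 0 => [(start, prev)]
  | k+1 =>
    if count = m then (start, prev) :: pvCP m (prev + 1) (prev + 1) 1 k
    else pvCP m start (prev + 1) (count + 1) k

def pvStep' (m : Int) (ranges : List (Int × Int)) (g : List Int) : List (Int × Int) :=
  match g with
  | [] => ranges
  | a :: _ =>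
    let b := g.getLastD a
    pvChunkLoop ranges a b m ((b - a).toNat + 1)

def pvBCore (m : Int) : List Int → List (Int × Int)
  | [] => []
  | a :: rest => pvBL m rest a a 1

theorem pvGroups_cons (p : Int × Int) (ps : List (Int × Int)) :
    pvGroups (p :: ps) =
      match pvGroups ps with
      | [] => [[p]]
      | [] :: gs => [p] :: [] :: gs
      | (q :: g) :: gs => if pvKey p = pvKey q then (p :: q :: g) :: gs else [p] :: (q :: g) :: gs := by
  cases ps <;> rfl

theorem pvRuns_cons (p : Int) (ps : List Int) :
    pvRuns (p :: ps) =
      match pvRuns ps with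
      | [] => [[p]]
      | [] :: gs => [p] :: [] :: gs
      | (b :: g) :: gs => if b = p + 1 then (p :: b :: g) :: gs else [p] :: (b :: g) :: gs := by
  cases ps <;> rfl

theorem pvGroups_cons_shape (ps : List (Int × Int)) (p : Int × Int) :
    ∃ g gs, pvGroups (p :: ps) = (p :: g) :: gs := by
  rw [pvGroups_cons]
  rcases pvGroups ps with _ | ⟨_ | ⟨r, g⟩, gs⟩
  · exact ⟨[], [], rfl⟩
  · exact ⟨[], [] :: gs, rfl⟩
  · by_cases hk : pvKey p = pvKey r
    · exact ⟨r :: g, gs, by simp [hk]⟩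
    · exact ⟨[], (r :: g) :: gs, by simp [hk]⟩

theorem pvRuns_cons_shape (ps : List Int) (p : Int) :
    ∃ g gs, pvRuns (p :: ps) = (p :: g) :: gs := by
  rw [pvRuns_cons]
  rcases pvRuns ps with _ | ⟨_ | ⟨r, g⟩, gs⟩
  · exact ⟨[], [], rfl⟩
  · exact ⟨[], [] :: gs, rfl⟩
  · by_cases hk : r = p + 1
    · exact ⟨r :: g, gs, by simp [hk]⟩
    · exact ⟨[], (r :: g) :: gs, by simp [hk]⟩

-- groups of enumerate, with indices dropped, are the runs
theorem pvGroups_enum (l : List Int) : ∀ n : Int,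
    (pvGroups (PySem.List.enumerate l n)).map (List.map Prod.snd) = pvRuns l := by
  induction l with
  | nil => intro n; simp [PySem.List.enumerate_nil, pvGroups, pvRuns]
  | cons a rest ih =>
    intro n
    cases rest with
    | nil =>
      simp [PySem.List.enumerate_cons, PySem.List.enumerate_nil, pvGroups, pvRuns]
    | cons b rest2 =>
      have hsh := pvGroups_cons_shape (PySem.List.enumerate rest2 (n + 1 + 1)) (n + 1, b)
      obtain ⟨g, gs, hg⟩ := hsh
      have hsh2 := pvRuns_cons_shape rest2 b
      obtain ⟨g2, gs2, hg2⟩ := hsh2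
      have ihb := ih (n + 1)
      rw [PySem.List.enumerate_cons] at ihb
      rw [hg, hg2] at ihb
      simp only [List.map_cons, List.cons.injEq] at ihb
      obtain ⟨⟨_, hgg⟩, hgs⟩ := ihb
      rw [PySem.List.enumerate_cons, pvGroups_cons, pvRuns_cons,
        PySem.List.enumerate_cons, hg, hg2]
      have hkey : (pvKey (n, a) = pvKey (n + 1, b)) ↔ (b = a + 1) := by
        simp only [pvKey]; omega
      by_cases hb : b = a + 1
      · simp [hb, hkey.mpr hb, hgg, hgs]
      · have : ¬ pvKey (n, a) = pvKey (n + 1, b) := fun h => hb (hkey.mp h)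
        simp [hb, this, hgg, hgs]

-- decomposition of any list into a maximal initial run continuation
theorem pvDecomp (l : List Int) : ∀ a : Int, ∃ (k : Nat) (tail : List Int),
    l = pvConsec a k ++ tail ∧
    (tail = [] ∨ ∃ r rest, tail = r :: rest ∧ r ≠ a + k + 1) := by
  induction l with
  | nil => intro a; exact ⟨0, [], rfl, Or.inl rfl⟩
  | cons x rest ih =>
    intro a
    by_cases hx : x = a + 1
    · obtain ⟨k, tail, he, hbr⟩ := ih (a + 1)
      refine ⟨k + 1, tail, ?_, ?_⟩
      · simp [pvConsec, ← hx, he]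
      · rcases hbr with h | ⟨r, rr, ht, hne⟩
        · exact Or.inl h
        · exact Or.inr ⟨r, rr, ht, by push_cast; push_cast at hne; omega⟩
    · exact ⟨0, x :: rest, by simp [pvConsec], Or.inr ⟨x, rest, rfl, by simpa using hx⟩⟩

-- runs split at the first maximal run
theorem pvRuns_split : ∀ (k : Nat) (a : Int) (tail : List Int),
    (tail = [] ∨ ∃ r rest, tail = r :: rest ∧ r ≠ a + k + 1) →
    pvRuns (a :: (pvConsec a k ++ tail)) = (a :: pvConsec a k) :: pvRuns tail := by
  intro k
  induction k with
  | zero =>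
    intro a tail hbr
    rcases hbr with h | ⟨r, rest, ht, hne⟩
    · simp [h, pvConsec, pvRuns]
    · subst ht
      obtain ⟨g, gs, hg⟩ := pvRuns_cons_shape rest r
      simp only [pvConsec, List.nil_append, pvRuns, hg]
      have : ¬ r = a + 1 := by push_cast at hne; omega
      simp [this, ← hg, pvRuns]
  | succ k ih =>
    intro a tail hbr
    have hbr' : tail = [] ∨ ∃ r rest, tail = r :: rest ∧ r ≠ (a + 1) + k + 1 := by
      rcases hbr with h | ⟨r, rest, ht, hne⟩
      · exact Or.inl h
      · exact Or.inr ⟨r, rest, ht, by push_cast; push_cast at hne; omega⟩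
    have := ih (a + 1) tail hbr'
    simp only [pvConsec, List.cons_append]
    rw [pvRuns, this]
    simp

-- accumulator lemma for the while loop
theorem pvChunkLoop_acc : ∀ (f : Nat) (r1 r2 : List (Int × Int)) (rs re m : Int),
    pvChunkLoop (r1 ++ r2) rs re m f = r1 ++ pvChunkLoop r2 rs re m f := by
  intro f
  induction f with
  | zero => intro r1 r2 rs re m; rfl
  | succ f ih =>
    intro r1 r2 rs re m
    simp only [pvChunkLoop, List.append_assoc]
    by_cases h : rs + m > re
    · simp [h]
    · simp only [h, if_false]
      exact ih r1 (r2 ++ [(rs, min re (rs + m - 1))]) (rs + m) re m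

theorem pvStep'_acc (m : Int) (r : List (Int × Int)) (g : List Int) :
    pvStep' m r g = r ++ pvStep' m [] g := by
  cases g with
  | nil => simp [pvStep']
  | cons a t =>
    simp only [pvStep']
    have := pvChunkLoop_acc (((( (a :: t).getLastD a) - a).toNat + 1)) r []
      a ((a :: t).getLastD a) m
    simpa using this

theorem pvFold_acc (m : Int) : ∀ (gs : List (List Int)) (r : List (Int × Int)),
    gs.foldl (pvStep' m) r = r ++ gs.foldl (pvStep' m) [] := by
  intro gs
  induction gs with
  | nil => simp
  | cons g gs ih =>
    intro r
    simp only [List.foldl_cons]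
    rw [ih (pvStep' m r g), ih (pvStep' m [] g), pvStep'_acc, List.append_assoc]

-- B's foldl equals pvBL
theorem pvB_fold (m : Int) : ∀ (rest : List Int) (r : List (Int × Int)) (start prev count : Int),
    (let st := rest.foldl (pvBStep m) (r, start, prev, count); st.1 ++ [(st.2.1, st.2.2.1)]) =
      r ++ pvBL m rest start prev count := by
  intro rest
  induction rest with
  | nil => intro r start prev count; simp [pvBL]
  | cons s rest ih =>
    intro r start prev count
    simp only [List.foldl_cons, pvBStep, pvBL]
    by_cases h : s ≠ prev + 1 ∨ count = m
    · simp only [h, if_true, if_pos h]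
      rw [ih]
      simp
    · simp only [h, if_false, if_neg h]
      exact ih r start s (count + 1)

-- B's pass over a maximal run followed by a break
theorem pvBL_run (m : Int) : ∀ (k : Nat) (start prev count : Int) (tail : List Int),
    (tail = [] ∨ ∃ r rest, tail = r :: rest ∧ r ≠ prev + k + 1) →
    pvBL m (pvConsec prev k ++ tail) start prev count =
      pvCP m start prev count k ++
        (match tail with | [] => [] | r :: rest => pvBL m rest r r 1) := by
  intro k
  induction k with
  | zero =>
    intro start prev count tail hbr
    rcases hbr with h | ⟨r, rest, ht, hne⟩
    · simp [h, pvConsec, pvBL, pvCP]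
    · subst ht
      have : r ≠ prev + 1 := by push_cast at hne; omega
      simp [pvConsec, pvBL, pvCP, this]
  | succ k ih =>
    intro start prev count tail hbr
    have hbr' : tail = [] ∨ ∃ r rest, tail = r :: rest ∧ r ≠ (prev + 1) + k + 1 := by
      rcases hbr with h | ⟨r, rest, ht, hne⟩
      · exact Or.inl h
      · exact Or.inr ⟨r, rest, ht, by push_cast at hne ⊢; omega⟩
    simp only [pvConsec, List.cons_append, pvBL, pvCP]
    by_cases hc : count = m
    · simp only [hc, if_pos (Or.inr rfl), if_true]
      rw [ih (prev + 1) (prev + 1) 1 tail hbr']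
      simp
    · have hcond : ¬ (prev + 1 ≠ prev + 1 ∨ count = m) := by
        push_neg; exact ⟨rfl, hc⟩
      simp only [if_neg hcond, if_neg hc]
      exact ih start (prev + 1) (count + 1) tail hbr'

-- pvCP when the rest of the run fits in the open chunk
theorem pvCP_fits (m : Int) : ∀ (k : Nat) (start prev count : Int),
    count + k ≤ m → pvCP m start prev count k = [(start, prev + k)] := by
  intro k
  induction k with
  | zero => intro start prev count h; simp [pvCP]
  | succ k ih =>
    intro start prev count h
    have hc : ¬ count = m := by push_cast at h; omega
    simp only [pvCP, if_neg hc]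
    rw [ih start (prev + 1) (count + 1) (by push_cast at h ⊢; omega)]
    have : prev + 1 + (k : Int) = prev + (k + 1 : Nat) := by push_cast; ring
    rw [this]

-- pvCP when the open chunk overflows
theorem pvCP_over (m : Int) : ∀ (k : Nat) (start prev count : Int),
    1 ≤ count → count ≤ m → m - count < (k : Int) →
    pvCP m start prev count k =
      (start, prev + (m - count)) ::
        pvCP m (prev + (m - count) + 1) (prev + (m - count) + 1) 1 (k - (m - count).toNat - 1) := by
  intro k
  induction k with
  | zero => intro start prev count h1 h2 h3; simp at h3; omega
  | succ k ih =>
    intro start prev count h1 h2 h3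
    by_cases hc : count = m
    · subst hc
      simp only [pvCP, if_pos rfl]
      have h0 : count - count = (0 : Int) := by ring
      norm_num
    · have hlt : count < m := lt_of_le_of_ne h2 hc
      simp only [pvCP, if_neg hc]
      have h3' : m - (count + 1) < (k : Int) := by push_cast at h3 ⊢; omega
      rw [ih start (prev + 1) (count + 1) (by omega) (by omega) h3']
      have e1 : prev + 1 + (m - (count + 1)) = prev + (m - count) := by ring
      have e2 : k - (m - (count + 1)).toNat - 1 = k + 1 - (m - count).toNat - 1 := by omega
      rw [e1, e2]

-- the crux: A's while-chunking of a run equals B's counting chunking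
theorem pvChunk_eq_CP (m : Int) (hm : 1 ≤ m) :
    ∀ (k : Nat) (f : Nat) (a : Int), k < f →
    pvChunkLoop [] a (a + k) m f = pvCP m a a 1 k := by
  intro k
  induction k using Nat.strong_induction_on with
  | _ k ih =>
    intro f a hf
    match f with
    | f + 1 =>
      simp only [pvChunkLoop]
      by_cases hstop : a + m > a + k
      · -- k < m : single chunk
        have hk : (k : Int) < m := by omega
        have hmin : min (a + k) (a + m - 1) = a + k := by omega
        rw [if_pos hstop]
        rw [pvCP_fits m k a a 1 (by omega), hmin]
        simp
      · -- k ≥ m : peel one chunk of m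
        have hk : m ≤ (k : Int) := by omega
        have hmin : min (a + k) (a + m - 1) = a + m - 1 := by omega
        rw [if_neg hstop, hmin]
        have hacc : pvChunkLoop ([] ++ [(a, a + m - 1)]) (a + m) (a + (k : Int)) m f =
            [(a, a + m - 1)] ++ pvChunkLoop [] (a + m) (a + (k : Int)) m f := by
          exact pvChunkLoop_acc f [(a, a + m - 1)] [] (a + m) (a + (k : Int)) m
        simp only [List.nil_append] at hacc ⊢
        rw [hacc]
        set k' : Nat := k - m.toNat with hk'
        have hk'lt : k' < k := by omega
        have hre : a + (k : Int) = (a + m) + (k' : Int) := by omega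
        have hflt : k' < f := by omega
        rw [hre, ih k' hk'lt f (a + m) hflt]
        rw [pvCP_over m k a a 1 (by omega) hm (by omega)]
        have e1 : a + (m - 1) = a + m - 1 := by ring
        have e2 : a + m - 1 + 1 = a + m := by ring
        have e3 : k - (m - 1).toNat - 1 = k' := by omega
        rw [e1, e2, e3]
        simp

theorem pvGetLastD_consec : ∀ (k : Nat) (a x : Int),
    (a :: pvConsec a k).getLastD x = a + k := by
  intro k
  induction k with
  | zero => intro a x; simp [pvConsec]
  | succ k ih =>
    intro a x
    simp only [pvConsec]
    have := ih (a + 1) x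
    simp only [List.getLastD_cons] at this ⊢
    rw [this]; push_cast; ring

-- main induction: fold over runs = B's single pass (on any list of ints)
theorem pvMain (m : Int) (hm : 1 ≤ m) :
    ∀ (n : Nat) (l : List Int), l.length ≤ n →
      (pvRuns l).foldl (pvStep' m) [] = pvBCore m l := by
  intro n
  induction n with
  | zero =>
    intro l hl
    have : l = [] := List.eq_nil_of_length_eq_zero (Nat.le_zero.mp hl)
    subst this; rfl
  | succ n ih =>
    intro l hl
    cases l with
    | nil => rfl
    | cons a rest =>
      obtain ⟨k, tail, he, hbr⟩ := pvDecomp rest a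
      subst he
      rw [pvRuns_split k a tail hbr]
      rw [List.foldl_cons, pvFold_acc]
      have hlen : (pvConsec a k).length = k := by
        clear hbr hl
        induction k generalizing a with
        | zero => rfl
        | succ k ihk => simp [pvConsec, ihk]
      have htl : tail.length ≤ n := by
        have := hl
        simp only [List.length_cons, List.length_append, hlen] at this
        omega
      rw [ih tail htl]
      have hstep : pvStep' m [] (a :: pvConsec a k) = pvCP m a a 1 k := by
        simp only [pvStep', pvGetLastD_consec]
        have hdiff : (a + (k : Int) - a).toNat = k := by omega
        rw [hdiff]
        exact pvChunk_eq_CP m hm k (k + 1) a (Nat.lt_succ_self k)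
      rw [hstep]
      show pvCP m a a 1 k ++ pvBCore m tail =
        pvBCore m (a :: (pvConsec a k ++ tail))
      rw [show pvBCore m (a :: (pvConsec a k ++ tail)) =
            pvBL m (pvConsec a k ++ tail) a a 1 from rfl]
      rw [pvBL_run m k a a 1 tail hbr]
      congr 1

-- A's step factors through the snd projection
theorem pvStep_map (m : Int) (r : List (Int × Int)) (g : List (Int × Int)) :
    pvStep m r g = pvStep' m r (g.map Prod.snd) := by
  cases g with
  | nil => rfl
  | cons p t =>
    simp only [pvStep, pvStep', List.map_cons]
    have hlast : ((p :: t).getLastD p).2 = (p.2 :: t.map Prod.snd).getLastD p.2 := by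
      rw [List.getLastD_eq_getLast?, List.getLastD_eq_getLast?]
      rw [show p.2 :: t.map Prod.snd = (p :: t).map Prod.snd from rfl]
      rw [List.getLast?_map]
      cases h : (p :: t).getLast? with
      | none => simp at h
      | some q => simp
    rw [hlast]

-- the whole of A on a list equals the whole of B on the same list
theorem pvAB (m : Int) (hm : 1 ≤ m) (s : List Int) :
    (pvGroups (PySem.List.enumerate s 0)).foldl (pvStep m) [] = pvBCore m s := by
  have h1 : (pvGroups (PySem.List.enumerate s 0)).foldl (pvStep m) [] =
      ((pvGroups (PySem.List.enumerate s 0)).map (List.map Prod.snd)).foldl (pvStep' m) [] := by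
    rw [List.foldl_map]
    have hfun : pvStep m = fun r g => pvStep' m r (List.map Prod.snd g) := by
      funext r g; exact pvStep_map m r g
    rw [hfun]
  rw [h1, pvGroups_enum s 0]
  exact pvMain m hm s.length s (le_refl _)

theorem pvAlt_eq_BCore (seeds : List Int) (m : Int) :
    find_seed_ranges_alt seeds m = pvBCore m (PySem.List.sorted seeds (fun x => x) false) := by
  unfold find_seed_ranges_alt
  cases h : PySem.List.sorted seeds (fun x => x) false with
  | nil => rfl
  | cons a rest =>
    simp only [pvBCore]
    have := pvB_fold m rest [] a a 1
    simpa using this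

-- ===== VERDICT (by name: the statement is the Claim_ definition above) =====
theorem find_seed_ranges_spec : Claim_equal_find_seed_ranges := by
  intro seeds m _hdom hpre
  unfold Spec_find_seed_ranges
  rcases hpre with h | hm
  · subst h; rfl
  · rw [pvAlt_eq_BCore]
    unfold find_seed_ranges
    exact pvAB m hm _
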